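-- pv_equiv track=rewrite | github.com/kurusugawa-computer/nighthawk-python | src/nighthawk/identifier_path.py | parse_identifier_path
-- ===== SOURCE A (Python) =====
-- def parse_identifier_path(path: str) -> tuple[str, ...] | None:
--     """Parse a dot-separated identifier path.
--
--     Returns a tuple of path segments on success, or ``None`` if the path is
--     empty, contains empty segments, non-ASCII characters, non-identifier
--     segments, or dunder-prefixed segments.
--     """
--     if not path:
--         return None
--
--     parts = path.split(".")
--     if any(part == "" for part in parts):
--         return None
--
--     for part in parts:
--         try:
--             part.encode("ascii")
--         except UnicodeEncodeError:
--             return None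
--         if not part.isidentifier():
--             return None
--         if part.startswith("__"):
--             return None
--
--     return tuple(parts)
-- ===== SOURCE B (Python) =====
-- def parse_identifier_path(path):
--     """Single-pass scanner: walk the characters once (with a sentinel dot at
--     the end), building each segment and validating it character by character;
--     no split, no per-segment re-scans."""
--     segs = []
--     cur = ""
--     for ch in path + ".":
--         if ch == ".":
--             if not cur:
--                 return None
--             segs.append(cur)
--             cur = ""
--         elif ch == "_" or "A" <= ch <= "Z" or "a" <= ch <= "z" or (cur and "0" <= ch <= "9"):
--             if cur == "_" and ch == "_":
--                 return None
--             cur += ch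
--         else:
--             return None
--     return tuple(segs)
-- ===== Notes on version B (the rewrite author's own statement) =====
-- stated objective: alternative
-- what changed: Replaces split-then-revalidate-each-segment (split, an any-pass for empty parts, then a per-part loop with encode/isidentifier/startswith re-scans) by a single left-to-right character scan with a sentinel dot that builds and validates each segment one character at a time.
import Mathlib
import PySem

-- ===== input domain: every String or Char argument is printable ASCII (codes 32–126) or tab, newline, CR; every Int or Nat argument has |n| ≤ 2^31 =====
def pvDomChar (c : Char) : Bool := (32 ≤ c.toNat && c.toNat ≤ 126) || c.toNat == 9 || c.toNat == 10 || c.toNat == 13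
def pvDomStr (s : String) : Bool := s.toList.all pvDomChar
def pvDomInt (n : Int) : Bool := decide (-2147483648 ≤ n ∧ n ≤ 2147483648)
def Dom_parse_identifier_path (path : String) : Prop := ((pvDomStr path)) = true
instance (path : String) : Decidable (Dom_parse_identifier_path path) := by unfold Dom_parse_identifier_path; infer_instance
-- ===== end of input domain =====

-- B replaces A's split-then-revalidate-each-segment pipeline by a single left-to-right
-- character scan (with a sentinel dot) that builds and validates segments as it goes;
-- objective: alternative (same O(n) cost, one pass instead of several).

-- ===== PORT A =====
-- port of Python's str.isidentifier; exact on the ASCII domain (outside ASCII Python's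
-- Unicode identifier rules differ, but Dom_ admits only ASCII strings)
def pyIsIdentifier (p : String) : Bool :=
  match p.toList with
  | [] => false
  | c :: rest => (c.isAlpha || c == '_') && rest.all (fun d => d.isAlphanum || d == '_')

-- the for-loop of A with its early `return None`s; `parts` is carried for the final return
def aLoop : List String → List String → Option (List String)
  | parts, [] => some parts
  | parts, p :: rest =>
    -- part.encode("ascii") raises UnicodeEncodeError exactly when some char is non-ASCII
    if !(p.toList.all (fun c => decide (c.toNat ≤ 127))) then none
    else if !(pyIsIdentifier p) then none
    else if PySem.Str.startswith p "__" then none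
    else aLoop parts rest

def parse_identifier_path (path : String) : Option (List String) :=
  if path = "" then none
  else
    let parts := (PySem.Chars.splitOn path.toList ['.']).map String.ofList
    if parts.any (fun p => p == "") then none
    else aLoop parts parts

-- ===== PORT B =====
-- the single scan of Source B: cur = chars of the current segment, segs = finished segments
def bScan : List Char → List Char → List String → Option (List String)
  | [], _cur, segs => some segs.reverse
  | c :: rest, cur, segs =>
    if c == '.' then
      if cur.isEmpty then none else bScan rest [] (String.ofList cur :: segs)
    else if c == '_' || ('A' ≤ c && c ≤ 'Z') || ('a' ≤ c && c ≤ 'z')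
            || (!cur.isEmpty && ('0' ≤ c && c ≤ '9')) then
      if cur == ['_'] && c == '_' then none
      else bScan rest (cur ++ [c]) segs
    else none

def parse_identifier_path_alt (path : String) : Option (List String) :=
  bScan (path.toList ++ ['.']) [] []

-- ===== PRECONDITION & SPEC =====
def Spec_parse_identifier_path (path : String) (out : Option (List String)) : Prop := out = parse_identifier_path_alt path
instance (path : String) (out : Option (List String)) : Decidable (Spec_parse_identifier_path path out) := by unfold Spec_parse_identifier_path; infer_instance

-- ===== CLAIM (what is proved, stated in full; the proofs are below) =====
def Claim_equal_parse_identifier_path : Prop := ∀ (path : String), Dom_parse_identifier_path path → Spec_parse_identifier_path path (parse_identifier_path path)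

-- ===== LEMMAS AND PROOFS =====

-- first chunk / remaining chunks of a '.'-split, structurally
def chunksH : List Char → List Char
  | [] => []
  | c :: r => if c = '.' then [] else c :: chunksH r

def chunksT : List Char → List (List Char)
  | [] => []
  | c :: r => if c = '.' then chunksH r :: chunksT r else chunksT r

def startDD : List Char → Bool
  | a :: b :: _ => a == '_' && b == '_'
  | _ => false

def identChars : List Char → Bool
  | [] => false
  | c :: rest => (c.isAlpha || c == '_') && rest.all (fun d => d.isAlphanum || d == '_')

def validSeg (l : List Char) : Bool := identChars l && !startDD l

theorem upper_eq (c : Char) : ('A' ≤ c && c ≤ 'Z') = c.isUpper := by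
  rw [Bool.eq_iff_iff]
  simp [Char.isUpper, Char.le_def, ge_iff_le]

theorem lower_eq (c : Char) : ('a' ≤ c && c ≤ 'z') = c.isLower := by
  rw [Bool.eq_iff_iff]
  simp [Char.isLower, Char.le_def, ge_iff_le]

theorem digit_eq (c : Char) : ('0' ≤ c && c ≤ '9') = c.isDigit := by
  rw [Bool.eq_iff_iff]
  simp [Char.isDigit, Char.le_def, ge_iff_le]

theorem splitOn_go_eq (fuel : Nat) : ∀ (l cur : List Char) (acc : List (List Char)),
    l.length ≤ fuel →
    PySem.Chars.splitOn.go ['.'] fuel l cur acc =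
      acc.reverse ++ (cur.reverse ++ chunksH l) :: chunksT l := by
  induction fuel with
  | zero =>
    intro l cur acc h
    have hl : l = [] := List.length_eq_zero_iff.mp (Nat.le_zero.mp h)
    subst hl
    simp [PySem.Chars.splitOn.go, chunksH, chunksT]
  | succ fuel ih =>
    intro l cur acc h
    cases l with
    | nil => simp [PySem.Chars.splitOn.go, chunksH, chunksT]
    | cons c rest =>
      by_cases hc : c = '.'
      · subst hc
        rw [PySem.Chars.splitOn.go]
        simp only [List.isPrefixOf, beq_self_eq_true, Bool.true_and, List.isPrefixOf_nil_left,
          if_true, List.length_cons, List.length_nil, List.drop_succ_cons, List.drop_zero]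
        rw [ih rest [] (cur.reverse :: acc) (by simpa using h)]
        simp [chunksH, chunksT]
      · rw [PySem.Chars.splitOn.go]
        have hb : ('.' == c) = false := by simpa using fun h' => hc h'.symm
        simp only [List.isPrefixOf, hb, Bool.false_and, if_false]
        rw [ih rest (c :: cur) acc (by simpa using Nat.le_of_succ_le_succ h)]
        simp [chunksH, chunksT, hc]

theorem splitOn_eq (l : List Char) :
    PySem.Chars.splitOn l ['.'] = chunksH l :: chunksT l := by
  unfold PySem.Chars.splitOn
  rw [splitOn_go_eq (l.length + 1) l [] [] (Nat.le_succ _)]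
  simp

theorem cont_ascii (c : Char) (h : (c.isAlphanum || c == '_') = true) :
    decide (c.toNat ≤ 127) = true := by
  have e1 : 'A'.val.toNat = 65 := by decide
  have e2 : 'Z'.val.toNat = 90 := by decide
  have e3 : 'a'.val.toNat = 97 := by decide
  have e4 : 'z'.val.toNat = 122 := by decide
  have e5 : '0'.val.toNat = 48 := by decide
  have e6 : '9'.val.toNat = 57 := by decide
  simp only [Char.isAlphanum, Char.isAlpha, Char.isDigit, Char.isUpper, Char.isLower,
    Bool.or_eq_true, Bool.and_eq_true, decide_eq_true_eq, ge_iff_le,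
    UInt32.le_iff_toNat_le, beq_iff_eq] at h
  simp only [decide_eq_true_eq, Char.toNat]
  rcases h with ((⟨h1, h2⟩ | ⟨h1, h2⟩) | ⟨h1, h2⟩) | h1
  · omega
  · omega
  · omega
  · subst h1; decide

theorem identChars_ascii (l : List Char) (hl : identChars l = true) :
    l.all (fun c => decide (c.toNat ≤ 127)) = true := by
  cases l with
  | nil => rfl
  | cons c rest =>
    simp only [identChars, Bool.and_eq_true] at hl
    obtain ⟨hc, hrest⟩ := hl
    simp only [List.all_cons, Bool.and_eq_true, List.all_eq_true] at *
    refine ⟨?_, fun d hd => cont_ascii d ?_⟩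
    · apply cont_ascii
      rcases Bool.or_eq_true_iff.mp hc with h | h
      · simp [Char.isAlphanum, h]
      · simp [h]
    · exact hrest d hd

theorem startswith_dd (p : String) : PySem.Str.startswith p "__" = startDD p.toList := by
  rw [PySem.Str.startswith_eq]
  show List.isPrefixOf _ _ = _
  match h : p.toList with
  | [] => rfl
  | [a] => simp [List.isPrefixOf, startDD]
  | a :: b :: t =>
    simp only [show ("__".toList) = ['_', '_'] from rfl, List.isPrefixOf, startDD,
      List.isPrefixOf_nil_left, Bool.and_true]
    rw [Bool.beq_comm (a := '_') (b := a), Bool.beq_comm (a := '_') (b := b)]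

theorem ofList_eq_empty_iff (l : List Char) : (String.ofList l = "") ↔ l = [] := by
  constructor
  · intro h
    have := congrArg String.toList h
    simpa using this
  · rintro rfl; rfl

theorem isEmpty_false_of_ne_nil {l : List Char} (h : l ≠ []) : l.isEmpty = false := by
  cases l with
  | nil => exact absurd rfl h
  | cons a t => rfl

theorem ne_nil_of_validSeg {l : List Char} (h : validSeg l = true) : l ≠ [] := by
  intro h0; subst h0; simp [validSeg, identChars] at h

theorem aLoop_eq (parts : List String) : ∀ (ps : List String),
    aLoop parts ps = if ps.all (fun p => validSeg p.toList) then some parts else none := by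
  intro ps
  induction ps with
  | nil => simp [aLoop]
  | cons p rest ih =>
    simp only [aLoop, List.all_cons]
    have hident : pyIsIdentifier p = identChars p.toList := by
      unfold pyIsIdentifier identChars
      cases p.toList <;> rfl
    cases hI : identChars p.toList with
    | false =>
      cases hA : p.toList.all (fun c => decide (c.toNat ≤ 127)) with
      | false => simp [hA, validSeg, hI]
      | true => simp [hA, hident, hI, validSeg]
    | true =>
      rw [identChars_ascii _ hI]
      simp only [Bool.not_true, Bool.false_eq_true, if_false, hident, hI]
      rw [startswith_dd]
      cases hD : startDD p.toList with
      | true => simp [validSeg, hI, hD]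
      | false => simp [validSeg, hI, hD, ih]

-- the common closed description both ports are reduced to
theorem parseA_eq (path : String) :
    parse_identifier_path path =
      (if ((chunksH path.toList :: chunksT path.toList).all validSeg)
       then some ((chunksH path.toList :: chunksT path.toList).map String.ofList)
       else none) := by
  unfold parse_identifier_path
  by_cases hp : path = ""
  · subst hp
    simp [chunksH, chunksT, validSeg, identChars]
  · simp only [hp, if_false]
    rw [splitOn_eq]
    set L := chunksH path.toList :: chunksT path.toList with hL
    by_cases hany : (L.map String.ofList).any (fun p => p == "") = true
    · simp only [hany, if_true]
      simp only [List.any_map, List.any_eq_true, Function.comp] at hany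
      obtain ⟨h, hmem, hempty⟩ := hany
      have h0 : h = [] := (ofList_eq_empty_iff h).mp (by simpa using hempty)
      have : L.all validSeg = false :=
        List.all_eq_false.mpr ⟨h, hmem, by simp [h0, validSeg, identChars]⟩
      simp [this]
    · simp only [Bool.not_eq_true] at hany
      simp only [hany, Bool.false_eq_true, if_false]
      rw [aLoop_eq]
      have hfun : ((fun p => validSeg p.toList) ∘ String.ofList) = validSeg :=
        funext fun h => by simp
      rw [List.all_map, hfun]
  -- (the `parts.any (· == "")` branch is subsumed: an empty chunk already falsifies validSeg)

theorem bScan_eq : ∀ (cs cur : List Char) (segs : List String),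
    (cur = [] ∨ validSeg cur = true) →
    bScan (cs ++ ['.']) cur segs =
      (if (((cur ++ chunksH cs) :: chunksT cs).all validSeg)
       then some (segs.reverse ++ ((cur ++ chunksH cs) :: chunksT cs).map String.ofList)
       else none) := by
  intro cs
  induction cs with
  | nil =>
    intro cur segs hcur
    simp only [List.nil_append, chunksH, chunksT, List.append_nil]
    rcases hcur with rfl | hv
    · simp [bScan, validSeg, identChars]
    · simp [bScan, isEmpty_false_of_ne_nil (ne_nil_of_validSeg hv), hv]
  | cons c rest ih =>
    intro cur segs hcur
    by_cases hc : c = '.'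
    · subst hc
      simp only [List.cons_append, bScan, beq_self_eq_true, if_true, chunksH, chunksT,
        if_pos rfl, List.append_nil]
      rcases hcur with rfl | hv
      · simp [validSeg, identChars]
      · rw [isEmpty_false_of_ne_nil (ne_nil_of_validSeg hv)]
        simp only [Bool.false_eq_true, if_false]
        rw [ih [] (String.ofList cur :: segs) (Or.inl rfl)]
        simp [hv, List.all_cons]
    · have hcb : (c == '.') = false := by simpa using hc
      simp only [List.cons_append, bScan, hcb, Bool.false_eq_true, if_false, chunksH, chunksT,
        if_neg hc, upper_eq, lower_eq, digit_eq]
      by_cases hcond : (c == '_' || c.isUpper || c.isLower || (!cur.isEmpty && c.isDigit)) = true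
      · rw [if_pos hcond]
        by_cases hdd : (cur == ['_'] && c == '_') = true
        · -- the scanned segment starts with "__": B bails out, and the chunk is a dunder
          rw [if_pos hdd]
          simp only [Bool.and_eq_true, beq_iff_eq] at hdd
          obtain ⟨h1, h2⟩ := hdd
          subst h1; subst h2
          simp [validSeg, startDD]
        · rw [if_neg hdd]
          have hnew : cur ++ [c] = [] ∨ validSeg (cur ++ [c]) = true := by
            right
            simp only [Bool.and_eq_true, beq_iff_eq, not_and] at hdd
            simp only [Bool.or_eq_true, Bool.and_eq_true, beq_iff_eq, Bool.not_eq_true'] at hcond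
            have hcont : (c.isAlphanum || c == '_') = true := by
              simp only [Char.isAlphanum, Char.isAlpha, Bool.or_eq_true, beq_iff_eq]
              tauto
            rcases hcur with rfl | hv
            · have hstart : (c.isAlpha || c == '_') = true := by
                simp only [List.isEmpty_nil, Bool.not_true, Bool.false_eq_true, false_and,
                  or_false] at hcond
                simp only [Char.isAlpha, Bool.or_eq_true, beq_iff_eq]
                tauto
              simp only [List.nil_append, validSeg, identChars, List.all_nil, Bool.and_true,
                hstart, Bool.true_and, Bool.not_eq_true']
              rfl
            · cases cur with
              | nil => simp [validSeg, identChars] at hv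
              | cons d cur' =>
                simp only [validSeg, identChars, List.cons_append, Bool.and_eq_true,
                  Bool.not_eq_true'] at hv ⊢
                obtain ⟨⟨hd, hall⟩, hnd⟩ := hv
                refine ⟨⟨hd, ?_⟩, ?_⟩
                · simp only [List.all_append, List.all_cons, List.all_nil, Bool.and_true,
                    Bool.and_eq_true]
                  exact ⟨hall, hcont⟩
                · cases cur' with
                  | nil =>
                    simp only [List.nil_append, startDD]
                    by_cases hd' : d = '_'
                    · subst hd'
                      have : ¬ c = '_' := hdd rfl
                      simp [this]
                    · simp [hd']
                  | cons e cur'' =>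
                    simpa [startDD] using hnd
          rw [ih (cur ++ [c]) segs hnew]
          simp
      · rw [if_neg hcond]
        -- c is not a legal identifier character here, so the chunk containing it is invalid
        have hinv : validSeg (cur ++ c :: chunksH rest) = false := by
          simp only [Bool.or_eq_true, Bool.and_eq_true, beq_iff_eq, not_or, not_and,
            Bool.not_eq_true] at hcond
          obtain ⟨⟨⟨hus, hup⟩, hlo⟩, hdig⟩ := hcond
          rcases hcur with rfl | hv
          · have hstart : (c.isAlpha || c == '_') = false := by
              simp only [Char.isAlpha, Bool.or_eq_false_iff, beq_eq_false_iff_ne, ne_eq]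
              exact ⟨⟨hup, hlo⟩, hus⟩
            simp [validSeg, identChars, hstart]
          · cases cur with
            | nil => simp [validSeg, identChars] at hv
            | cons d cur' =>
              have hdig' : c.isDigit = false := by
                have : (!List.isEmpty (d :: cur')) = true := by rfl
                exact hdig this
              have hcnot : (c.isAlphanum || c == '_') = false := by
                simp only [Char.isAlphanum, Char.isAlpha, Bool.or_eq_false_iff,
                  beq_eq_false_iff_ne, ne_eq]
                exact ⟨⟨⟨hup, hlo⟩, hdig'⟩, hus⟩
              have htail : ((cur' ++ c :: chunksH rest).all (fun d => d.isAlphanum || d == '_')) = false :=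
                List.all_eq_false.mpr ⟨c, by simp, by simp [hcnot]⟩
              simp [validSeg, identChars, htail]
        simp [List.all_cons, hinv]

-- ===== VERDICT (by name: the statement is the Claim_ definition above) =====
theorem parse_identifier_path_spec : Claim_equal_parse_identifier_path := by
  intro path _hdom
  unfold Spec_parse_identifier_path parse_identifier_path_alt
  rw [parseA_eq, bScan_eq path.toList [] [] (Or.inl rfl)]
  simp
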